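-- pv_equiv track=rewrite | github.com/Aarmartin/Quarto-AI | qutil.py | finalPlace
-- ===== SOURCE A (Python) =====
-- def finalPlace(b):
-- 	loc = None
-- 	for x, row in enumerate(b):
-- 		for y, val in enumerate(row):
-- 			if val is None and loc is None:
-- 				loc = (x,y)
-- 			elif val is None and loc is not None:
-- 				return
-- 	return loc
-- ===== SOURCE B (Python) =====
-- def finalPlace(b):
--     counts = [row.count(None) for row in b]
--     if sum(counts) != 1:
--         return None
--     x = counts.index(1)
--     return (x, b[x].index(None))
-- ===== Notes on version B (the rewrite author's own statement) =====
-- stated objective: alternative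
-- what changed: B replaces A's stateful short-circuiting scan with staged passes: per-row counts of None, a decision on their total, then index lookups (counts.index(1) and row.index(None)) to locate the lone empty.
import Mathlib
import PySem

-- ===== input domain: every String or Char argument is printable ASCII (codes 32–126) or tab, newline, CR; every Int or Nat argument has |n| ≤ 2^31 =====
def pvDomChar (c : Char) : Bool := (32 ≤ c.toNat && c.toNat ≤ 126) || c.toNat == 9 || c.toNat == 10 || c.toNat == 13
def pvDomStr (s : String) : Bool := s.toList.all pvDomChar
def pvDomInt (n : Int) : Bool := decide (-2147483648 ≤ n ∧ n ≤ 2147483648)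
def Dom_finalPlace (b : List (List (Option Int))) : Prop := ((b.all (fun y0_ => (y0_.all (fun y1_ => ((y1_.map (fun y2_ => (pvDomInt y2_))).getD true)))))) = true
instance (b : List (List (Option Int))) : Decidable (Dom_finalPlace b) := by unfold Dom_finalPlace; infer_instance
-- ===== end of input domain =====

-- B computes per-row counts of None, decides by the total, and locates the unique empty by
-- index lookups — staged passes instead of A's stateful scan with an early return (objective: alternative).


-- ===== PORT A =====
-- inner 'for y, val in enumerate(row)': .error () models the early 'return' on a second empty
def pvInnerA (x : Int) : List (Int × Option Int) → Option (Int × Int) → Except Unit (Option (Int × Int))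
  | [], loc => .ok loc
  | (y, val) :: rest, loc =>
    if val = none ∧ loc = none then pvInnerA x rest (some (x, y))
    else if val = none ∧ loc ≠ none then .error ()
    else pvInnerA x rest loc

-- outer 'for x, row in enumerate(b)'
def pvOuterA : List (Int × List (Option Int)) → Option (Int × Int) → Option (Int × Int)
  | [], loc => loc
  | (x, row) :: rest, loc =>
    match pvInnerA x (PySem.List.enumerate row 0) loc with
    | .error _ => none
    | .ok loc' => pvOuterA rest loc'

def finalPlace (b : List (List (Option Int))) : Option (Int × Int) :=
  pvOuterA (PySem.List.enumerate b 0) none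

-- ===== PORT B =====
-- counts = [row.count(None) for row in b]; if sum(counts) != 1: return None;
-- x = counts.index(1); return (x, b[x].index(None))
-- the 'none' branches of the matches are where Python's .index / b[x] would raise; they are
-- unreachable when sum(counts) = 1 (proved implicitly by the equivalence theorem)
def finalPlace_alt (b : List (List (Option Int))) : Option (Int × Int) :=
  let counts : List Nat := b.map (fun row => PySem.List.count row none)
  if counts.sum ≠ 1 then none
  else
    match PySem.List.index? counts 1 with
    | none => none
    | some x =>
      match PySem.List.pyGet? b (x : Int) with
      | none => none
      | some row =>
        match PySem.List.index? row none with
        | none => none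
        | some y => some ((x : Int), (y : Int))

-- ===== PRECONDITION & SPEC =====
def Spec_finalPlace (b : List (List (Option Int))) (out : Option (Int × Int)) : Prop := out = finalPlace_alt b
instance (b : List (List (Option Int))) (out : Option (Int × Int)) : Decidable (Spec_finalPlace b out) := by unfold Spec_finalPlace; infer_instance

-- ===== CLAIM (what is proved, stated in full; the proofs are below) =====
def Claim_equal_finalPlace : Prop := ∀ (b : List (List (Option Int))), Dom_finalPlace b → Spec_finalPlace b (finalPlace b)

-- ===== LEMMAS AND PROOFS =====

-- the list of empty-cell coordinates, and the "pick" both programs compute from it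
def pvPick (l : List (Int × Int)) : Option (Int × Int) :=
  if l.length = 1 then l[0]? else none

def pvRowEmp (x : Int) (row : List (Int × Option Int)) : List (Int × Int) :=
  row.filterMap (fun q => if q.2 = none then some (x, q.1) else none)

def pvAllEmp (rows : List (Int × List (Option Int))) : List (Int × Int) :=
  rows.flatMap (fun p => pvRowEmp p.1 (PySem.List.enumerate p.2 0))

theorem pvInnerA_char (x : Int) (row : List (Int × Option Int)) (loc : Option (Int × Int)) :
    pvInnerA x row loc =
      if 2 ≤ (loc.toList ++ pvRowEmp x row).length then .error ()
      else .ok (loc.toList ++ pvRowEmp x row)[0]? := by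
  induction row generalizing loc with
  | nil =>
    cases loc <;> simp [pvInnerA, pvRowEmp]
  | cons q rest ih =>
    obtain ⟨y, val⟩ := q
    cases val with
    | none =>
      cases loc with
      | none =>
        rw [show pvInnerA x ((y, none) :: rest) none = pvInnerA x rest (some (x, y)) from by
          simp [pvInnerA]]
        rw [ih]
        simp [pvRowEmp]
      | some l =>
        simp [pvInnerA, pvRowEmp]
    | some v =>
      have h1 : ¬ ((some v : Option Int) = none ∧ loc = none) := by simp
      have h2 : ¬ ((some v : Option Int) = none ∧ loc ≠ none) := by simp
      simp only [pvInnerA, if_neg h1, if_neg h2]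
      rw [ih]
      simp [pvRowEmp]

theorem pvOuterA_char (rows : List (Int × List (Option Int))) (loc : Option (Int × Int)) :
    pvOuterA rows loc = pvPick (loc.toList ++ pvAllEmp rows) := by
  induction rows generalizing loc with
  | nil =>
    cases loc <;> simp [pvOuterA, pvAllEmp, pvPick]
  | cons p rest ih =>
    obtain ⟨x, row⟩ := p
    simp only [pvOuterA, pvInnerA_char]
    split_ifs with h
    · simp only [pvAllEmp, List.flatMap_cons, pvPick]
      rw [if_neg]
      simp only [List.length_append] at h ⊢
      omega
    · change pvOuterA rest _ = _
      rw [ih]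
      simp only [pvAllEmp, List.flatMap_cons, pvPick]
      have : (loc.toList ++ pvRowEmp x (PySem.List.enumerate row 0)).length ≤ 1 := by omega
      have hl : ((loc.toList ++ pvRowEmp x (PySem.List.enumerate row 0))[0]?).toList
          = loc.toList ++ pvRowEmp x (PySem.List.enumerate row 0) := by
        rcases hst : loc.toList ++ pvRowEmp x (PySem.List.enumerate row 0) with _ | ⟨a, tl⟩
        · simp
        · rw [hst] at this; simp at this
          simp [this]
      rw [hl, List.append_assoc]

-- B-side facts -----------------------------------------------------------

theorem pvRowEmp_length (x : Int) (row : List (Option Int)) (k : Int) :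
    (pvRowEmp x (PySem.List.enumerate row k)).length = row.count none := by
  induction row generalizing k with
  | nil => simp [pvRowEmp, PySem.List.enumerate_nil]
  | cons v rest ih =>
    rw [PySem.List.enumerate_cons]
    have ihh := ih (k + 1)
    cases v <;>
      simp only [pvRowEmp, List.filterMap_cons] at ihh ⊢ <;>
      simp [ihh]

theorem pvAllEmp_length (b : List (List (Option Int))) (k : Int) :
    (pvAllEmp (PySem.List.enumerate b k)).length
      = (b.map (fun row => row.count (none : Option Int))).sum := by
  induction b generalizing k with
  | nil => simp [pvAllEmp, PySem.List.enumerate_nil]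
  | cons r rest ih =>
    rw [PySem.List.enumerate_cons]
    show (pvRowEmp k (PySem.List.enumerate r 0) ++ pvAllEmp (PySem.List.enumerate rest (k + 1))).length = _
    rw [List.length_append, pvRowEmp_length, ih (k + 1), List.map_cons, List.sum_cons]

theorem pvRowEmp_singleton {r : List (Option Int)} {x j X Y : Int}
    (h : pvRowEmp x (PySem.List.enumerate r j) = [(X, Y)]) :
    X = x ∧ ∃ y0 : Nat, PySem.List.index? r (none : Option Int) = some y0 ∧ Y = j + y0 := by
  induction r generalizing j with
  | nil => simp [pvRowEmp, PySem.List.enumerate_nil] at h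
  | cons v rest ih =>
    rw [PySem.List.enumerate_cons] at h
    cases v with
    | none =>
      simp only [pvRowEmp, List.filterMap_cons] at h
      obtain ⟨h1, _⟩ := List.cons_eq_cons.mp h
      obtain ⟨hX, hY⟩ := Prod.mk.injEq .. ▸ h1
      refine ⟨hX.symm, 0, ?_, by omega⟩
      exact PySem.List.index?_cons_self ..
    | some w =>
      simp only [pvRowEmp, List.filterMap_cons] at h
      have h' : pvRowEmp x (PySem.List.enumerate rest (j + 1)) = [(X, Y)] := by
        simpa [pvRowEmp] using h
      obtain ⟨hx, y0, hy, hY⟩ := ih h'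
      refine ⟨hx, y0 + 1, ?_, by push_cast; omega⟩
      rw [PySem.List.index?_cons_of_ne rest (by simp), hy]; rfl

theorem pvAllEmp_singleton {b : List (List (Option Int))} {k X Y : Int}
    (h : pvAllEmp (PySem.List.enumerate b k) = [(X, Y)]) :
    ∃ (x0 : Nat) (row : List (Option Int)) (y0 : Nat),
      PySem.List.index? (b.map (fun r => PySem.List.count r (none : Option Int))) 1 = some x0 ∧
      b[x0]? = some row ∧ PySem.List.index? row (none : Option Int) = some y0 ∧
      X = k + x0 ∧ Y = (y0 : Int) := by
  induction b generalizing k with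
  | nil => simp [pvAllEmp, PySem.List.enumerate_nil] at h
  | cons r rest ih =>
    rw [PySem.List.enumerate_cons] at h
    have h2 : pvRowEmp k (PySem.List.enumerate r 0) ++ pvAllEmp (PySem.List.enumerate rest (k + 1)) = [(X, Y)] := h
    rcases hhd : pvRowEmp k (PySem.List.enumerate r 0) with _ | ⟨e, tl⟩
    · -- this row has no empties: its count is 0, recurse on the rest
      have hcnt : r.count (none : Option Int) = 0 := by
        have := pvRowEmp_length k r 0; rw [hhd] at this; simpa using this.symm
      rw [hhd, List.nil_append] at h2
      obtain ⟨x0, row, y0, hix, hget, hiy, hX, hY⟩ := ih h2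
      refine ⟨x0 + 1, row, y0, ?_, by simpa using hget, hiy, by push_cast; omega, hY⟩
      rw [List.map_cons,
        PySem.List.index?_cons_of_ne _ (by simp [PySem.List.count_eq, hcnt]), hix]
      rfl
    · -- this row carries the lone empty
      rw [hhd] at h2
      obtain ⟨h1, h3⟩ := List.cons_eq_cons.mp h2
      rcases List.append_eq_nil_iff.mp h3 with ⟨h4, h5⟩
      have hrow : pvRowEmp k (PySem.List.enumerate r 0) = [(X, Y)] := by rw [hhd, h4, h1]
      obtain ⟨hX, y0, hiy, hY⟩ := pvRowEmp_singleton hrow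
      have hcnt : r.count (none : Option Int) = 1 := by
        have := pvRowEmp_length k r 0; rw [hrow] at this; simpa using this.symm
      refine ⟨0, r, y0, ?_, by simp, hiy, by omega, by omega⟩
      rw [List.map_cons]
      have : PySem.List.count r (none : Option Int) = 1 := by
        simpa [PySem.List.count_eq] using hcnt
      rw [this]
      exact PySem.List.index?_cons_self ..

theorem finalPlace_eq_alt (b : List (List (Option Int))) :
    finalPlace b = finalPlace_alt b := by
  unfold finalPlace
  rw [pvOuterA_char]
  simp only [Option.toList_none, List.nil_append]
  unfold finalPlace_alt
  by_cases hs : (List.map (fun row => PySem.List.count row (none : Option Int)) b).sum = 1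
  · have hlen : (pvAllEmp (PySem.List.enumerate b 0)).length = 1 := by
      rw [pvAllEmp_length b 0]
      simpa [PySem.List.count_eq] using hs
    rcases hE : pvAllEmp (PySem.List.enumerate b 0) with _ | ⟨⟨X, Y⟩, tl⟩
    · rw [hE] at hlen; simp at hlen
    · have htl : tl = [] := by rw [hE] at hlen; simpa using hlen
      subst htl
      obtain ⟨x0, row, y0, hix, hget, hiy, hX, hY⟩ := pvAllEmp_singleton hE
      have hs' : ¬ ((List.map (fun row => PySem.List.count row (none : Option Int)) b).sum ≠ 1) := by
        simpa using hs
      simp only [pvPick, List.length_cons, List.length_nil, if_neg hs', hix,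
        PySem.List.pyGet?_natCast, hget, hiy]
      simp [hX, hY]
  · rw [if_pos (by simpa using hs)]
    rw [pvPick, if_neg]
    rw [pvAllEmp_length b 0]
    simpa [PySem.List.count_eq] using hs

-- ===== VERDICT (by name: the statement is the Claim_ definition above) =====
theorem finalPlace_spec : Claim_equal_finalPlace := by
  intro b _
  unfold Spec_finalPlace
  exact finalPlace_eq_alt b
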